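-- pv_equiv track=rewrite | github.com/luboblu/Master-Thesis | gpt_promiseeval_english.py | _select_balanced_subset
-- ===== SOURCE A (Python) =====
-- from typing import Dict, Any, List, Tuple
--
-- def _select_balanced_subset(candidates: List[Dict[str, Any]], task: str, k: int) -> List[Dict[str, Any]]:
--     if len(candidates) <= k:
--         return candidates
--     by_label: Dict[str, List[Dict[str, Any]]] = {}
--     for s in candidates:
--         by_label.setdefault(s.get(task, "N/A"), []).append(s)
--     selected: List[Dict[str, Any]] = []
--     labels = list(by_label.keys())
--     for lab in labels:
--         if len(selected) < k and by_label[lab]: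
--             selected.append(by_label[lab].pop(0))
--     while len(selected) < k:
--         added = False
--         for lab in labels:
--             if len(selected) >= k: break
--             if by_label[lab]:
--                 selected.append(by_label[lab].pop(0))
--                 added = True
--         if not added: break
--     return selected
-- ===== SOURCE B (Python) =====
-- def _select_balanced_subset(candidates, task, k):
--     if len(candidates) <= k:
--         return candidates
--     groups = {}
--     for s in candidates:
--         groups.setdefault(s.get(task, "N/A"), []).append(s)
--     gs = list(groups.values())
--     out = []
--     j = 0
--     while True:
--         row = [g[j] for g in gs if len(g) > j]
--         if not row:
--             break
--         out += row
--         j += 1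
--     return out[:max(k, 0)]
-- ===== Notes on version B (the rewrite author's own statement) =====
-- stated objective: alternative
-- what changed: A pops elements from mutable per-label buckets in a two-phase loop (first pass + while loop with an 'added' flag and per-element k checks); B builds the full round-robin interleaving by pure index-based transposition of the immutable buckets (round j reads g[j] of every long-enough group) and then slices the first max(k,0) elements.
import Mathlib
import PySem

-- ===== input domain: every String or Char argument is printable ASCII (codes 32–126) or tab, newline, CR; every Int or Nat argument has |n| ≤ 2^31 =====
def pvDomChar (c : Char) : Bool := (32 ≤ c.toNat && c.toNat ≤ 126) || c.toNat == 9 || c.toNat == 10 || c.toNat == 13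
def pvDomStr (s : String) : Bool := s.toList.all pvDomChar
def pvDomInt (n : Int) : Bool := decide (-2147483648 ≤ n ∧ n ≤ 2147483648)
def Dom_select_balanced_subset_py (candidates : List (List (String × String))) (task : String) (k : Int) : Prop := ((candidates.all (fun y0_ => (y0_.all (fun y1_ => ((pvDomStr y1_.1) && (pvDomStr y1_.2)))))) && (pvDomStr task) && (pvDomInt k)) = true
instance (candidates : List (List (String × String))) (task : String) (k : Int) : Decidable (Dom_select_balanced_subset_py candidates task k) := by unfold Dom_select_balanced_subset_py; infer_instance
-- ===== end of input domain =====

-- B replaces A's two-phase pop-based round robin by an index-based transposition of the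
-- label buckets followed by a single slice (objective: alternative decomposition).

-- shared helper: the Python expression `s.get(task, "N/A")` (dict lookup = first match)
def pyGetLabel (s : List (String × String)) (task : String) : String :=
  (((s.find? (fun p => p.1 == task)).map (·.2)).getD "N/A")

-- ===== PORT A =====
-- one traversal of `labels` popping the front of each still-nonempty bucket while
-- len(selected) < k; this is the body of BOTH of A's selection loops (the first `for`
-- ignores the Bool, which is the while-loop's `added` flag)
def pvPassA (k : Int) (labels : List String)
    (st : (List (List (String × String)) × PySem.Dict String (List (List (String × String)))) × Bool) :
    (List (List (String × String)) × PySem.Dict String (List (List (String × String)))) × Bool :=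
  labels.foldl (fun st lab =>
    if (st.1.1.length : Int) < k then
      match st.1.2.getD lab [] with
      | [] => st
      | x :: rest => ((st.1.1 ++ [x], st.1.2.insert lab rest), true)
    else st) st

-- A's `while len(selected) < k:` loop; the fuel bounds the number of iterations (each
-- productive iteration pops at least one element, so candidates.length + 1 is enough)
def pvWhileA (labels : List String) (k : Int) :
    Nat → (List (List (String × String)) × PySem.Dict String (List (List (String × String)))) →
    (List (List (String × String)) × PySem.Dict String (List (List (String × String))))
  | 0, st => st
  | fuel + 1, st =>
    if (st.1.length : Int) < k then
      let r := pvPassA k labels (st, false)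
      if r.2 then pvWhileA labels k fuel r.1 else r.1
    else st

def select_balanced_subset_py (candidates : List (List (String × String))) (task : String) (k : Int) : List (List (String × String)) :=
  if (candidates.length : Int) ≤ k then candidates
  else
    -- by_label.setdefault(lab, []).append(s)  ≡  modify lab [] (· ++ [s])
    let byLabel := candidates.foldl
      (fun d s => d.modify (pyGetLabel s task) [] (fun g => g ++ [s])) PySem.Dict.empty
    let labels := byLabel.keys
    let st1 := (pvPassA k labels (([], byLabel), false)).1
    (pvWhileA labels k (candidates.length + 1) st1).1

-- ===== PORT B =====
-- the rows loop of Source B: row j = [g[j] for g in gs if len(g) > j]; stop at the first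
-- empty row; the fuel bounds the number of rounds (≤ candidates.length)
def pvRowsB (gs : List (List (List (String × String)))) :
    Nat → Nat → List (List (String × String))
  | 0, _ => []
  | fuel + 1, j =>
    let row := gs.filterMap (fun g => g[j]?)
    if row = [] then [] else row ++ pvRowsB gs fuel (j + 1)

def select_balanced_subset_py_alt (candidates : List (List (String × String))) (task : String) (k : Int) : List (List (String × String)) :=
  if (candidates.length : Int) ≤ k then candidates
  else
    let groups := candidates.foldl
      (fun d s => d.modify (pyGetLabel s task) [] (fun g => g ++ [s])) PySem.Dict.empty
    let gs := groups.values
    let out := pvRowsB gs (candidates.length + 1) 0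
    PySem.List.slice out none (some (max k 0))    -- out[:max(k, 0)]

-- ===== PRECONDITION & SPEC =====
def Spec_select_balanced_subset_py (candidates : List (List (String × String))) (task : String) (k : Int) (out : List (List (String × String))) : Prop := out = select_balanced_subset_py_alt candidates task k
instance (candidates : List (List (String × String))) (task : String) (k : Int) (out : List (List (String × String))) : Decidable (Spec_select_balanced_subset_py candidates task k out) := by unfold Spec_select_balanced_subset_py; infer_instance

-- ===== CLAIM (what is proved, stated in full; the proofs are below) =====
def Claim_equal_select_balanced_subset_py : Prop := ∀ (candidates : List (List (String × String))) (task : String) (k : Int), Dom_select_balanced_subset_py candidates task k → Spec_select_balanced_subset_py candidates task k (select_balanced_subset_py candidates task k)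

-- ===== LEMMAS AND PROOFS =====

-- reference order: round-robin over the buckets (all heads, then recurse on the tails)
def pvHeads {α : Type} (gs : List (List α)) : List α := gs.filterMap List.head?

def pvTotal {α : Type} (gs : List (List α)) : Nat := (gs.map List.length).sum

@[simp] lemma pvHeads_cons_nil {α : Type} (gs : List (List α)) :
    pvHeads ([] :: gs) = pvHeads gs := by simp [pvHeads]

@[simp] lemma pvHeads_cons_cons {α : Type} (x : α) (t : List α) (gs : List (List α)) :
    pvHeads ((x :: t) :: gs) = x :: pvHeads gs := by simp [pvHeads]

lemma pvTotal_tail_le {α : Type} (gs : List (List α)) :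
    pvTotal (gs.map List.tail) ≤ pvTotal gs := by
  induction gs with
  | nil => simp [pvTotal]
  | cons g gs ih =>
    simp only [pvTotal, List.map_cons, List.sum_cons, List.map_map] at *
    have : g.tail.length ≤ g.length := by cases g <;> simp
    omega

lemma pvTotal_tail_lt {α : Type} (gs : List (List α)) (h : pvHeads gs ≠ []) :
    pvTotal (gs.map List.tail) < pvTotal gs := by
  induction gs with
  | nil => simp [pvHeads] at h
  | cons g gs ih =>
    cases g with
    | nil =>
      simp only [pvHeads, List.filterMap_cons, List.head?] at h
      have := ih h
      simp only [pvTotal, List.map_cons, List.sum_cons, List.tail] at *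
      omega
    | cons x t =>
      have := pvTotal_tail_le gs
      simp only [pvTotal, List.map_cons, List.sum_cons, List.tail, List.length_cons] at *
      omega

def pvRR {α : Type} (gs : List (List α)) : List α :=
  if h : pvHeads gs = [] then [] else pvHeads gs ++ pvRR (gs.map List.tail)
termination_by pvTotal gs
decreasing_by exact pvTotal_tail_lt gs h

lemma pvRR_nil {α : Type} (gs : List (List α)) (h : pvHeads gs = []) : pvRR gs = [] := by
  rw [pvRR]; simp [h]

lemma pvRR_cons {α : Type} (gs : List (List α)) (h : pvHeads gs ≠ []) :
    pvRR gs = pvHeads gs ++ pvRR (gs.map List.tail) := by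
  rw [pvRR]; simp [h]

-- popN n gs: remove the head of the first n nonempty buckets (one partial pass of A)
def pvPopN {α : Type} : Nat → List (List α) → List (List α)
  | _, [] => []
  | n, [] :: gs => [] :: pvPopN n gs
  | 0, g :: gs => g :: gs
  | n + 1, (_ :: t) :: gs => t :: pvPopN n gs

lemma pvPopN_zero {α : Type} (gs : List (List α)) : pvPopN 0 gs = gs := by
  induction gs with
  | nil => rfl
  | cons g gs ih => cases g <;> simp [pvPopN, ih]

lemma pvPopN_all_nil {α : Type} (n : Nat) (gs : List (List α)) (h : pvHeads gs = []) :
    pvPopN n gs = gs := by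
  induction gs with
  | nil => rfl
  | cons g gs ih =>
    cases g with
    | nil =>
      simp only [pvHeads, List.filterMap_cons, List.head?] at h
      simp [pvPopN, ih h]
    | cons x t => simp [pvHeads, List.filterMap_cons, List.head?] at h

lemma pvPopN_ge {α : Type} (n : Nat) (gs : List (List α)) (h : (pvHeads gs).length ≤ n) :
    pvPopN n gs = gs.map List.tail := by
  induction gs generalizing n with
  | nil => rfl
  | cons g gs ih =>
    cases g with
    | nil =>
      simp only [pvHeads, List.filterMap_cons, List.head?] at h
      simp [pvPopN, List.tail, ih n h]
    | cons x t =>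
      simp only [pvHeads_cons_cons, List.length_cons] at h
      cases n with
      | zero => omega
      | succ m =>
        simp only [pvPopN, List.map_cons, List.tail]
        exact congrArg _ (ih m (by omega))

lemma pvTotal_popN_le {α : Type} (n : Nat) (gs : List (List α)) :
    pvTotal (pvPopN n gs) ≤ pvTotal gs := by
  induction gs generalizing n with
  | nil => simp [pvPopN]
  | cons g gs ih =>
    cases g with
    | nil =>
      simp only [pvPopN, pvTotal, List.map_cons, List.sum_cons] at *
      have := ih n; omega
    | cons x t =>
      cases n with
      | zero => simp [pvPopN_zero]
      | succ m =>
        simp only [pvPopN, pvTotal, List.map_cons, List.sum_cons, List.length_cons] at *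
        have := ih m; omega

lemma pvTotal_popN_lt {α : Type} (n : Nat) (gs : List (List α)) (hn : 0 < n)
    (h : pvHeads gs ≠ []) : pvTotal (pvPopN n gs) < pvTotal gs := by
  induction gs generalizing n with
  | nil => simp [pvHeads] at h
  | cons g gs ih =>
    cases g with
    | nil =>
      simp only [pvHeads, List.filterMap_cons, List.head?] at h
      simp only [pvPopN, pvTotal, List.map_cons, List.sum_cons] at *
      have := ih n hn h; omega
    | cons x t =>
      cases n with
      | zero => omega
      | succ m =>
        simp only [pvPopN, pvTotal, List.map_cons, List.sum_cons, List.length_cons]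
        have := pvTotal_popN_le m gs
        simp only [pvTotal] at *; omega

-- take n of the round-robin order = the partial pass plus round robin of the popped state
lemma pvTake_rr_split {α : Type} (n : Nat) (gs : List (List α)) (h : pvHeads gs ≠ []) :
    (pvHeads gs).take n ++ (pvRR (pvPopN n gs)).take (n - min n (pvHeads gs).length)
      = (pvRR gs).take n := by
  rw [pvRR_cons gs h, List.take_append]
  by_cases hle : n ≤ (pvHeads gs).length
  · have h1 : n - min n (pvHeads gs).length = 0 := by omega
    have h2 : n - (pvHeads gs).length = 0 := by omega
    rw [h1, h2]; simp
  · have h1 : n - min n (pvHeads gs).length = n - (pvHeads gs).length := by omega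
    rw [h1, pvPopN_ge n gs (by omega)]

-- Forall₂ utilities for the dict ↔ buckets correspondence
lemma pvForall₂_map {α β : Type} (l : List α) (h : α → β) :
    List.Forall₂ (fun a b => h a = b) l (l.map h) := by
  induction l with
  | nil => exact List.Forall₂.nil
  | cons a l ih => exact List.Forall₂.cons rfl ih

lemma pvForall₂_insert {ν : Type} (labels : List String) (gs : List (List ν))
    (d : PySem.Dict String (List ν)) (lab : String) (t : List ν)
    (hcorr : List.Forall₂ (fun l g => d.getD l [] = g) labels gs) (hlab : lab ∉ labels) :
    List.Forall₂ (fun l g => (d.insert lab t).getD l [] = g) labels gs := by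
  induction hcorr with
  | nil => exact List.Forall₂.nil
  | cons hg _ ih =>
    rename_i a b l1 l2
    simp only [List.mem_cons, not_or] at hlab
    refine List.Forall₂.cons ?_ (ih (by simp [hlab.2]))
    rw [PySem.Dict.getD_eq_get?_getD, PySem.Dict.get?_insert_of_ne d t (Ne.symm hlab.1),
      ← PySem.Dict.getD_eq_get?_getD]
    exact hg

-- ===== A-side: what one pass does =====
lemma pvPassA_spec (k : Int) (labels : List String)
    (gs : List (List (List (String × String))))
    (d : PySem.Dict String (List (List (String × String))))
    (sel : List (List (String × String))) (added : Bool)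
    (hcorr : List.Forall₂ (fun lab g => d.getD lab [] = g) labels gs)
    (hnd : labels.Nodup) :
    ∃ d',
      pvPassA k labels ((sel, d), added)
        = ((sel ++ (pvHeads gs).take (k.toNat - sel.length), d'),
           added || decide (0 < k.toNat - sel.length ∧ pvHeads gs ≠ []))
      ∧ List.Forall₂ (fun lab g => d'.getD lab [] = g) labels (pvPopN (k.toNat - sel.length) gs)
      ∧ (∀ key : String, key ∉ labels → d'.get? key = d.get? key) := by
  induction labels generalizing gs d sel added with
  | nil =>
    cases hcorr
    refine ⟨d, ?_, ?_, fun _ _ => rfl⟩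
    · simp [pvPassA, pvHeads]
    · simp only [pvPopN]; exact List.Forall₂.nil
  | cons lab labels ih =>
    cases hcorr with
    | cons hg hcorr' =>
      rename_i g gs'
      have hnd' : labels.Nodup := hnd.of_cons
      have hlab : lab ∉ labels := by
        simp only [List.nodup_cons] at hnd; exact hnd.1
      by_cases hk : (sel.length : Int) < k
      · have hk' : sel.length < k.toNat := by omega
        cases g with
        | nil =>
          -- empty bucket: this label is skipped
          obtain ⟨d', heq, hc', hpres⟩ := ih gs' d sel added hcorr' hnd'
          have hstep : pvPassA k (lab :: labels) ((sel, d), added)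
              = pvPassA k labels ((sel, d), added) := by
            simp only [pvPassA, List.foldl_cons]
            rw [if_pos hk, hg]
          refine ⟨d', ?_, ?_, ?_⟩
          · rw [hstep, heq]
            simp
          · simp only [pvHeads_cons_nil, pvPopN]
            refine List.Forall₂.cons ?_ hc'
            rw [PySem.Dict.getD_eq_get?_getD, hpres lab hlab, ← PySem.Dict.getD_eq_get?_getD]
            exact hg
          · intro key hkey
            simp only [List.mem_cons, not_or] at hkey
            exact hpres key hkey.2
        | cons x t =>
          -- nonempty bucket: pop x
          obtain ⟨m, hm⟩ : ∃ m, k.toNat - sel.length = m + 1 := ⟨k.toNat - sel.length - 1, by omega⟩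
          have hstep : pvPassA k (lab :: labels) ((sel, d), added)
              = pvPassA k labels ((sel ++ [x], d.insert lab t), true) := by
            simp only [pvPassA, List.foldl_cons]
            rw [if_pos hk, hg]
          obtain ⟨d', heq, hc', hpres⟩ := ih gs' (d.insert lab t) (sel ++ [x]) true
            (pvForall₂_insert labels gs' d lab t hcorr' hlab) hnd'
          have hlen : k.toNat - (sel ++ [x]).length = m := by
            simp only [List.length_append, List.length_cons, List.length_nil]; omega
          refine ⟨d', ?_, ?_, ?_⟩
          · rw [hstep, heq, hlen, hm]
            have hflag : (added || decide (0 < m + 1 ∧ pvHeads ((x :: t) :: gs') ≠ [])) = true := by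
              simp
            rw [hflag]
            simp [List.take_succ_cons, List.append_assoc]
          · rw [hm]
            simp only [pvHeads_cons_cons, pvPopN]
            rw [hlen] at hc'
            refine List.Forall₂.cons ?_ hc'
            rw [PySem.Dict.getD_eq_get?_getD, hpres lab hlab, PySem.Dict.get?_insert_self]
            rfl
          · intro key hkey
            simp only [List.mem_cons, not_or] at hkey
            rw [hpres key hkey.2, PySem.Dict.get?_insert_of_ne d t hkey.1]
      · -- len(selected) ≥ k: the whole pass is a no-op
        have hk0 : k.toNat - sel.length = 0 := by omega
        obtain ⟨d', heq, hc', hpres⟩ := ih gs' d sel added hcorr' hnd'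
        have hstep : pvPassA k (lab :: labels) ((sel, d), added)
            = pvPassA k labels ((sel, d), added) := by
          simp only [pvPassA, List.foldl_cons]
          rw [if_neg hk]
        refine ⟨d', ?_, ?_, ?_⟩
        · rw [hstep, heq, hk0]
          simp
        · rw [hk0, pvPopN_zero]
          rw [hk0, pvPopN_zero] at hc'
          refine List.Forall₂.cons ?_ hc'
          rw [PySem.Dict.getD_eq_get?_getD, hpres lab hlab, ← PySem.Dict.getD_eq_get?_getD]
          exact hg
        · intro key hkey
          simp only [List.mem_cons, not_or] at hkey
          exact hpres key hkey.2

-- ===== A-side: what the while loop does =====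
lemma pvWhileA_spec (k : Int) (labels : List String) (fuel : Nat) :
    ∀ (gs : List (List (List (String × String))))
      (d : PySem.Dict String (List (List (String × String))))
      (sel : List (List (String × String))),
      List.Forall₂ (fun lab g => d.getD lab [] = g) labels gs →
      labels.Nodup →
      pvTotal gs < fuel →
      (pvWhileA labels k fuel (sel, d)).1 = sel ++ (pvRR gs).take (k.toNat - sel.length) := by
  induction fuel with
  | zero => intro gs d sel _ _ hfuel; omega
  | succ fuel ih =>
    intro gs d sel hcorr hnd hfuel
    by_cases hk : (sel.length : Int) < k
    · obtain ⟨d', heq, hc', _⟩ := pvPassA_spec k labels gs d sel false hcorr hnd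
      have hn : 0 < k.toNat - sel.length := by omega
      by_cases hh : pvHeads gs = []
      · have hflag : (false || decide (0 < k.toNat - sel.length ∧ pvHeads gs ≠ [])) = false := by
          simp [hh]
        simp only [pvWhileA, if_pos hk]
        rw [heq, hflag]
        simp only [Bool.false_eq_true, if_false]
        rw [pvRR_nil gs hh, hh]
      · have hflag : (false || decide (0 < k.toNat - sel.length ∧ pvHeads gs ≠ [])) = true := by
          simp [hh, hn]
        simp only [pvWhileA, if_pos hk]
        rw [heq, hflag]
        simp only [if_true]
        have hfuel' : pvTotal (pvPopN (k.toNat - sel.length) gs) < fuel := by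
          have := pvTotal_popN_lt (k.toNat - sel.length) gs hn hh
          omega
        rw [ih (pvPopN (k.toNat - sel.length) gs) d' (sel ++ (pvHeads gs).take (k.toNat - sel.length)) hc' hnd hfuel']
        have hlen : (sel ++ (pvHeads gs).take (k.toNat - sel.length)).length
            = sel.length + min (k.toNat - sel.length) (pvHeads gs).length := by
          simp [List.length_take]
        rw [hlen, List.append_assoc]
        congr 1
        have harith : k.toNat - (sel.length + min (k.toNat - sel.length) (pvHeads gs).length)
            = (k.toNat - sel.length) - min (k.toNat - sel.length) (pvHeads gs).length := by omega
        rw [harith]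
        exact pvTake_rr_split (k.toNat - sel.length) gs hh
    · have hk0 : k.toNat - sel.length = 0 := by omega
      simp only [pvWhileA, if_neg hk]
      rw [hk0]
      simp

-- ===== grouping characterization =====
lemma pvGroup_getD (cs : List (List (String × String))) (task : String) (lab : String) :
    (cs.foldl (fun d s => d.modify (pyGetLabel s task) [] (fun g => g ++ [s]))
      PySem.Dict.empty).getD lab []
    = cs.filter (fun s => pyGetLabel s task == lab) := by
  have hfold : (cs.foldl (fun d s => d.modify (pyGetLabel s task) [] (fun g => g ++ [s]))
      (PySem.Dict.empty : PySem.Dict String (List (List (String × String)))))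
    = ((cs.map (fun s => (pyGetLabel s task, s))).foldl
        (fun d p => d.modify p.1 [] (fun g => g ++ [p.2])) PySem.Dict.empty) := by
    rw [List.foldl_map]
  rw [hfold, PySem.Dict.getD_foldl_modify_append]
  simp [List.filter_map, Function.comp_def, List.map_map]

lemma pvSum_indicator_zero {α : Type} [DecidableEq α] (x : α) (labels : List α)
    (h : x ∉ labels) (f : α → Nat) (g : α → Nat) (hfg : ∀ lab ∈ labels, f lab = g lab) :
    (labels.map f).sum = (labels.map g).sum := by
  rw [List.map_congr_left hfg]

-- one new element increases the bucket-size sum by at most one (labels distinct)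
lemma pvSum_filter_cons (cs : List (List (String × String))) (task : String)
    (s : List (String × String)) :
    ∀ (labels : List String), labels.Nodup →
      (labels.map (fun lab => ((s :: cs).filter (fun a => pyGetLabel a task == lab)).length)).sum
        ≤ 1 + (labels.map (fun lab => (cs.filter (fun a => pyGetLabel a task == lab)).length)).sum := by
  intro labels
  induction labels with
  | nil => simp
  | cons lab rest ih =>
    intro hnd
    have hnd' : rest.Nodup := hnd.of_cons
    have hlab : lab ∉ rest := by simp only [List.nodup_cons] at hnd; exact hnd.1
    simp only [List.map_cons, List.sum_cons]
    by_cases hs : pyGetLabel s task = lab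
    · have h1 : ((s :: cs).filter (fun a => pyGetLabel a task == lab)).length
          = 1 + (cs.filter (fun a => pyGetLabel a task == lab)).length := by
        simp [List.filter_cons, hs]; omega
      have h2 : (rest.map (fun l => ((s :: cs).filter (fun a => pyGetLabel a task == l)).length)).sum
          = (rest.map (fun l => (cs.filter (fun a => pyGetLabel a task == l)).length)).sum := by
        refine pvSum_indicator_zero lab rest hlab _ _ ?_
        intro l hl
        have : pyGetLabel s task ≠ l := by
          rw [hs]; intro heq; exact hlab (heq ▸ hl)
        simp [List.filter_cons, this]
      rw [h1, h2]; omega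
    · have h1 : ((s :: cs).filter (fun a => pyGetLabel a task == lab)).length
          = (cs.filter (fun a => pyGetLabel a task == lab)).length := by
        simp [List.filter_cons, hs]
      have := ih hnd'
      rw [h1]; omega

lemma pvSum_filter_le (cs : List (List (String × String))) (task : String) :
    ∀ (labels : List String), labels.Nodup →
      (labels.map (fun lab => (cs.filter (fun a => pyGetLabel a task == lab)).length)).sum
        ≤ cs.length := by
  induction cs with
  | nil => intro labels _; simp
  | cons s cs ih =>
    intro labels hnd
    have h1 := pvSum_filter_cons cs task s labels hnd
    have h2 := ih labels hnd
    simp only [List.length_cons]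
    omega

-- ===== B-side: the rows loop is the round robin =====
lemma pvRow_eq_heads (gs : List (List (List (String × String)))) (j : Nat) :
    gs.filterMap (fun g => g[j]?) = pvHeads (gs.map (List.drop j)) := by
  simp only [pvHeads, List.filterMap_map, Function.comp_def, List.head?_drop]

lemma pvRowsB_spec (fuel : Nat) :
    ∀ (gs : List (List (List (String × String)))) (j : Nat),
      pvTotal (gs.map (List.drop j)) < fuel →
      pvRowsB gs fuel j = pvRR (gs.map (List.drop j)) := by
  induction fuel with
  | zero => intro gs j h; omega
  | succ fuel ih =>
    intro gs j hfuel
    have hdrop : (gs.map (List.drop j)).map List.tail = gs.map (List.drop (j + 1)) := by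
      simp [List.map_map, Function.comp_def, List.tail_drop]
    by_cases hrow : gs.filterMap (fun g => g[j]?) = []
    · simp only [pvRowsB, hrow, if_pos]
      rw [pvRR_nil _ (by rw [← pvRow_eq_heads]; exact hrow)]
    · simp only [pvRowsB, if_neg hrow]
      have hh : pvHeads (gs.map (List.drop j)) ≠ [] := by
        rw [← pvRow_eq_heads]; exact hrow
      rw [pvRR_cons _ hh, ← pvRow_eq_heads]
      congr 1
      have hfuel' : pvTotal (gs.map (List.drop (j + 1))) < fuel := by
        have := pvTotal_tail_lt (gs.map (List.drop j)) hh
        rw [hdrop] at this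
        omega
      rw [ih gs (j + 1) hfuel', hdrop]

-- ===== VERDICT (by name: the statement is the Claim_ definition above) =====
theorem select_balanced_subset_py_spec : Claim_equal_select_balanced_subset_py := by
  intro cs task k _
  unfold Spec_select_balanced_subset_py select_balanced_subset_py select_balanced_subset_py_alt
  by_cases hle : (cs.length : Int) ≤ k
  · rw [if_pos hle, if_pos hle]
  · rw [if_neg hle, if_neg hle]
    set d := cs.foldl (fun d s => d.modify (pyGetLabel s task) [] (fun g => g ++ [s]))
      PySem.Dict.empty with hd
    have hnd : d.keys.Nodup := by
      rw [hd]
      exact PySem.Dict.nodup_keys_foldl_modify_key cs (fun s => pyGetLabel s task) []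
        (fun _ s => fun g => g ++ [s]) PySem.Dict.empty (by simp [PySem.Dict.nodup_keys_empty])
    have hvals : d.values = d.keys.map (fun lab => d.getD lab []) :=
      PySem.Dict.values_eq_map_keys d hnd []
    have hcorr : List.Forall₂ (fun lab g => d.getD lab [] = g) d.keys d.values := by
      rw [hvals]; exact pvForall₂_map d.keys _
    have htot : pvTotal d.values ≤ cs.length := by
      rw [hvals]
      have : d.keys.map (fun lab => (d.getD lab []).length)
          = d.keys.map (fun lab => (cs.filter (fun a => pyGetLabel a task == lab)).length) := by
        refine List.map_congr_left ?_
        intro lab _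
        rw [hd, pvGroup_getD]
      simp only [pvTotal, List.map_map, Function.comp_def]
      rw [this]
      exact pvSum_filter_le cs task d.keys hnd
    -- B side
    have hdrop0 : d.values.map (List.drop 0) = d.values := by
      have h0 : ∀ g ∈ d.values, List.drop 0 g = id g := fun g _ => List.drop_zero
      rw [List.map_congr_left h0, List.map_id]
    have hB : pvRowsB d.values (cs.length + 1) 0 = pvRR d.values := by
      have hb := pvRowsB_spec (cs.length + 1) d.values 0 (by rw [hdrop0]; omega)
      rw [hdrop0] at hb
      exact hb
    -- A side: first pass then while loop
    obtain ⟨d', heq, hc', _⟩ := pvPassA_spec k d.keys d.values d [] false hcorr hnd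
    have hsel1 : (pvPassA k d.keys (([], d), false)).1
        = ((pvHeads d.values).take k.toNat, d') := by
      rw [heq]; simp
    have hwhile := pvWhileA_spec k d.keys (cs.length + 1) (pvPopN k.toNat d.values) d'
      ((pvHeads d.values).take k.toNat)
      (by simpa using hc') hnd
      (by have := pvTotal_popN_le k.toNat d.values; omega)
    show (pvWhileA d.keys k (cs.length + 1) ((pvPassA k d.keys (([], d), false)).1)).1
      = PySem.List.slice (pvRowsB d.values (cs.length + 1) 0) none (some (max k 0))
    rw [hsel1, hwhile]
    have hmax : (max k 0).toNat = k.toNat := by omega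
    rw [hB, PySem.List.slice_to (pvRR d.values) (by omega), hmax]
    by_cases hh : pvHeads d.values = []
    · rw [pvRR_nil _ hh, hh, pvPopN_all_nil _ _ hh, pvRR_nil _ hh]
      simp
    · have hlen : ((pvHeads d.values).take k.toNat).length
          = min k.toNat (pvHeads d.values).length := by simp [List.length_take]
      rw [hlen]
      have harith : k.toNat - min k.toNat (pvHeads d.values).length
          = k.toNat - min k.toNat (pvHeads d.values).length := rfl
      exact pvTake_rr_split k.toNat d.values hh
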